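-- pv_equiv track=rewrite | github.com/SergioTA01229274/Python-Code | Finalpartial/recursion.py | sumaArregloR
-- ===== SOURCE A (Python) =====
-- def sumaArregloR(lista):
--     if len(lista) > 1:
--         if lista[1]:
--             lista[0] = lista[0] + lista[1]
--             lista.remove(lista[1])
--             return sumaArregloR(lista)
--         else:
--             return lista[0]
--     else:
--         return lista[0]
-- ===== SOURCE B (Python) =====
-- def sumaArregloR(lista):
--     # Iterative accumulation; equivalence is about the RETURN value only
--     # (A mutates lista in place, B does not).
--     total = lista[0]
--     for x in lista[1:]:
--         if not x:
--             break
--         total += x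
--     return total
-- ===== Notes on version B (the rewrite author's own statement) =====
-- stated objective: simpler
-- what changed: Replaces the tail recursion with in-place mutation and remove-by-value by a single non-mutating left-to-right accumulation over lista[1:] that stops at the first zero (the remove-collision case is value-irrelevant since it only fires when the accumulator is 0).
-- outside the precondition, e.g. on sumaArregloR([]): A raises IndexError, B raises IndexError
import Mathlib
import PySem

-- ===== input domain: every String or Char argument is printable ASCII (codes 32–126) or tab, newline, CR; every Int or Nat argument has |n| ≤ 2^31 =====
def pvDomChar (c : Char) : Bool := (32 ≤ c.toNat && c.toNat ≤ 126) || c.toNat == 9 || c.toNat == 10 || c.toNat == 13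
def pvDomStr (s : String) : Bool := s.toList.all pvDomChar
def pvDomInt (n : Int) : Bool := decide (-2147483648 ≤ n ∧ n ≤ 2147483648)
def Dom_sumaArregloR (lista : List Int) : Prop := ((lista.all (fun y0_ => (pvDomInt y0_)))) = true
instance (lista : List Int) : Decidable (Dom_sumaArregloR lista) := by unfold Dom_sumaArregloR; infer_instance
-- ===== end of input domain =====

-- B replaces A's tail recursion with in-place mutation by a simple non-mutating
-- left-to-right accumulation (objective: simpler); equivalence is about the RETURN
-- value only — A mutates lista in place, B does not.

-- ===== PORT A =====
-- A: if len > 1 and lista[1] truthy, set lista[0] += lista[1], remove first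
-- occurrence of lista[1]'s value (PySem.List.remove?), recurse; else lista[0].
-- [] raises IndexError in Python (excluded by Pre_); the port returns 0 there.
def sumaArregloR (lista : List Int) : Int :=
  match lista with
  | [] => 0
  | [h] => h
  | h :: x :: t =>
      if x ≠ 0 then
        sumaArregloR (((PySem.List.remove? ((h + x) :: x :: t) x)).getD [])
      else h
termination_by lista.length
decreasing_by
  have hx : PySem.List.remove? ((h + x) :: x :: t) x
      = some (if h + x = x then x :: t else (h + x) :: t) := by
    by_cases hc : h + x = x
    · simp [hc, PySem.List.remove?_cons_self]
    · have hi : List.idxOf? x ((h + x) :: x :: t) = some 1 := by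
        simp [List.idxOf?_cons, hc]
      simp [PySem.List.remove?, hi]
  simp [hx]
  split <;> simp

-- ===== PORT B =====
-- loop accumulator: total over the tail, stopping at the first zero
def sumaArregloRAltGo (total : Int) : List Int → Int
  | [] => total
  | x :: t => if x = 0 then total else sumaArregloRAltGo (total + x) t

def sumaArregloR_alt (lista : List Int) : Int :=
  match lista with
  | [] => 0   -- Python raises IndexError here; excluded by Pre_
  | h :: t => sumaArregloRAltGo h t

-- ===== PRECONDITION & SPEC =====
-- Pre_ excludes only the empty list, on which Python A raises IndexError.
def Pre_sumaArregloR (lista : List Int) : Prop := lista ≠ []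
instance (lista : List Int) : Decidable (Pre_sumaArregloR lista) := by unfold Pre_sumaArregloR; infer_instance
def pvWitness_sumaArregloR : List Int := ([1, 2, 0, 3])
def Spec_sumaArregloR (lista : List Int) (out : Int) : Prop := out = sumaArregloR_alt lista
instance (lista : List Int) (out : Int) : Decidable (Spec_sumaArregloR lista out) := by unfold Spec_sumaArregloR; infer_instance

-- ===== CLAIM (what is proved, stated in full; the proofs are below) =====
def Claim_equal_sumaArregloR : Prop := ∀ (lista : List Int), Dom_sumaArregloR lista → Pre_sumaArregloR lista → Spec_sumaArregloR lista (sumaArregloR lista)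

-- ===== LEMMAS AND PROOFS =====

-- The remove-by-value step: the first occurrence of x in (h+x) :: x :: t is
-- index 0 iff h + x = x, but then h + x and x are the same value, so the
-- resulting list of values is (h+x) :: t in every case.
theorem sumaArregloR_remove_step (h x : Int) (t : List Int) :
    PySem.List.remove? ((h + x) :: x :: t) x = some ((h + x) :: t) := by
  by_cases hc : h + x = x
  · simp [hc, PySem.List.remove?_cons_self]
  · have hi : List.idxOf? x ((h + x) :: x :: t) = some 1 := by
      simp [List.idxOf?_cons, hc]
    simp [PySem.List.remove?, hi]

theorem sumaArregloR_go (t : List Int) : ∀ h : Int,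
    sumaArregloR (h :: t) = sumaArregloRAltGo h t := by
  induction t with
  | nil => intro h; simp [sumaArregloR, sumaArregloRAltGo]
  | cons x t ih =>
      intro h
      by_cases hx : x = 0
      · simp [sumaArregloR, sumaArregloRAltGo, hx]
      · rw [sumaArregloR]
        simp only [hx, sumaArregloR_remove_step, Option.getD_some, if_pos, ne_eq,
          not_false_iff]
        rw [ih (h + x)]
        simp [sumaArregloRAltGo, hx]

-- ===== VERDICT (by name: the statement is the Claim_ definition above) =====
theorem sumaArregloR_spec : Claim_equal_sumaArregloR := by
  intro lista _ hpre
  match lista with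
  | [] => exact absurd rfl hpre
  | h :: t =>
      show sumaArregloR (h :: t) = sumaArregloR_alt (h :: t)
      rw [sumaArregloR_go t h]; rfl
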